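-- pv_equiv track=rewrite | github.com/MariannaSh/Python-Tasks | 12-Test3/mock1/p7.1.py | f
-- ===== SOURCE A (Python) =====
-- def f(arr2D):
--     # Перебираем столбцы
--     for col1 in range(len(arr2D[0])):
--         for col2 in range(col1 + 1, len(arr2D[0])):
--             # Сравниваем суммы значений в двух столбцах
--             sum_col1 = sum(row[col1] for row in arr2D)
--             sum_col2 = sum(row[col2] for row in arr2D)
--             if sum_col1 == sum_col2:
--                 return True
--
--     # Если не найдено двух столбцов с одинаковой суммой
--     return False
-- ===== SOURCE B (Python) =====
-- def f(arr2D):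
--     sums = [sum(col) for col in zip(*arr2D)]
--     return len(set(sums)) != len(sums)
-- ===== Notes on version B (the rewrite author's own statement) =====
-- stated objective: faster
-- what changed: Instead of comparing every pair of columns and recomputing both column sums inside the doubly nested loop, B computes each column sum once (via zip) and detects a repeated sum with a set.
-- outside the precondition, e.g. on f([[1, 1, 5], [0, 0]]): A returns True, B returns True
import Mathlib
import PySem

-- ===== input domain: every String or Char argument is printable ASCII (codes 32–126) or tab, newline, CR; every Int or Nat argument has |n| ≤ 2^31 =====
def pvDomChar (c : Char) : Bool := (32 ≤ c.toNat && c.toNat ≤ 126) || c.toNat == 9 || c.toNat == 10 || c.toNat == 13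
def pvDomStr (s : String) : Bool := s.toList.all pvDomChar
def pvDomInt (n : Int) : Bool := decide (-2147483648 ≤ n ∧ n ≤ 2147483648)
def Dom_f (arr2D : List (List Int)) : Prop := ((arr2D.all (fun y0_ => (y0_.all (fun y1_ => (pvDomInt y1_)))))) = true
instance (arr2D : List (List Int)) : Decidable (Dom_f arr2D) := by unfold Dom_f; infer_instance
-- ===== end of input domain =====

-- B computes each column sum once (zip) and detects a repeated sum with a set, instead of
-- A's pairwise column comparison that recomputes both sums inside the doubly nested loop.

-- ===== PORT A =====
-- sum(row[col] for row in arr2D); pyGetD is exact under Pre_f (index in range for every row)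
def colSumA (arr2D : List (List Int)) (c : Int) : Int :=
  arr2D.foldl (fun acc row => acc + PySem.List.pyGetD row c 0) 0

def f (arr2D : List (List Int)) : Bool :=
  let n : Int := ((PySem.List.pyGetD arr2D 0 []).length : Int)
  (PySem.List.pyRange 0 n 1).any (fun c1 =>
    (PySem.List.pyRange (c1 + 1) n 1).any (fun c2 =>
      colSumA arr2D c1 == colSumA arr2D c2))

-- ===== PORT B =====
-- zip(*arr2D): the columns, truncated to the shortest row (empty when there are no rows)
def zipStar (arr2D : List (List Int)) : List (List Int) :=
  let m : Nat := ((arr2D.map List.length).min?).getD 0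
  (List.range m).map (fun c => arr2D.map (fun row => row.getD c 0))

def f_alt (arr2D : List (List Int)) : Bool :=
  let sums := (zipStar arr2D).map List.sum
  decide ((PySem.Set.ofList sums).length ≠ sums.length)

-- ===== PRECONDITION & SPEC =====
-- Pre_f excludes the inputs on which A raises IndexError — the empty list (arr2D[0]) and,
-- when there are at least two columns, a row shorter than the first row (row[col]) — except
-- that A can also return True on such ragged input by finding an early pair of equal column
-- sums before indexing past a short row; that return-vs-raise boundary depends on A's scan
-- order and is not a closed-form condition on the input, so those inputs stay excluded.
def Pre_f (arr2D : List (List Int)) : Prop :=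
  arr2D ≠ [] ∧ ((arr2D.headD []).length ≤ 1 ∨ ∀ row ∈ arr2D, (arr2D.headD []).length ≤ row.length)
instance (arr2D : List (List Int)) : Decidable (Pre_f arr2D) := by unfold Pre_f; infer_instance

def pvWitness_f : List (List Int) := [[1, 2, 3], [4, 0, 3]]

def Spec_f (arr2D : List (List Int)) (out : Bool) : Prop := out = f_alt arr2D
instance (arr2D : List (List Int)) (out : Bool) : Decidable (Spec_f arr2D out) := by unfold Spec_f; infer_instance

-- ===== CLAIM (what is proved, stated in full; the proofs are below) =====
def Claim_equal_f : Prop := ∀ (arr2D : List (List Int)), Dom_f arr2D → Pre_f arr2D → Spec_f arr2D (f arr2D)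

-- ===== LEMMAS AND PROOFS =====

-- under Pre_, the min row length is the first row's length
lemma min_len (arr2D : List (List Int)) (hne : arr2D ≠ [])
    (hle : ∀ row ∈ arr2D, (arr2D.headD []).length ≤ row.length) :
    ((arr2D.map List.length).min?).getD 0 = (arr2D.headD []).length := by
  obtain ⟨a, tl, rfl⟩ := List.exists_cons_of_ne_nil hne
  simp only [List.map_cons, List.min?_cons, Option.getD_some, List.headD_cons] at *
  cases hmin : (tl.map List.length).min? with
  | none => simp
  | some m =>
      have hm := List.min?_mem hmin
      obtain ⟨row, hrow, rfl⟩ := List.mem_map.mp hm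
      have : a.length ≤ row.length := hle row (List.mem_cons.mpr (Or.inr hrow))
      simp [Nat.min_eq_left this]

-- the min row length never exceeds the first row's length
lemma min_le_head (arr2D : List (List Int)) (hne : arr2D ≠ []) :
    ((arr2D.map List.length).min?).getD 0 ≤ (arr2D.headD []).length := by
  obtain ⟨a, tl, rfl⟩ := List.exists_cons_of_ne_nil hne
  simp only [List.map_cons, List.min?_cons, Option.getD_some, List.headD_cons]
  cases hmin : (tl.map List.length).min? with
  | none => simp
  | some m => simp

-- any list with at most one element has no duplicates
lemma nodup_of_le_one {l : List Int} (h : l.length ≤ 1) : l.Nodup := by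
  match l, h with
  | [], _ => exact List.nodup_nil
  | [x], _ => simp

-- per-column: B's column sum equals A's (both default to 0 out of range)
lemma colSum_eq (arr2D : List (List Int)) (c : Nat) :
    (arr2D.map (fun row => row.getD c 0)).sum = colSumA arr2D (c : Int) := by
  unfold colSumA
  simp only [PySem.List.pyGetD_natCast]
  rw [List.sum_eq_foldl, List.foldl_map]

-- length of set(l) equals the length of l iff l has no duplicates
lemma set_len_iff (l : List Int) :
    (PySem.Set.ofList l).length = l.length ↔ l.Nodup := by
  have hperm : (PySem.Set.ofList l).Perm l.dedup :=
    (List.perm_ext_iff_of_nodup (PySem.Set.nodup_ofList l) l.nodup_dedup).mpr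
      (fun x => by simp [PySem.Set.mem_ofList, List.mem_dedup])
  rw [hperm.length_eq]
  constructor
  · intro hlen
    have := (List.dedup_sublist l).eq_of_length hlen
    exact this ▸ l.nodup_dedup
  · intro hnd
    rw [hnd.dedup]

-- duplicates in (range n).map g, phrased as A's pair search finds them
lemma nodup_map_range_iff (n : Nat) (g : Nat → Int) :
    ((List.range n).map g).Nodup ↔ ∀ i j : Nat, i < j → j < n → g i ≠ g j := by
  rw [List.Nodup, List.pairwise_map, List.pairwise_iff_getElem]
  simp only [List.length_range, List.getElem_range]
  constructor
  · intro h i j hij hj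
    exact h i j (Nat.lt_trans hij hj) hj hij
  · intro h i j _hi hj hij
    exact h i j hij hj

-- the one-or-zero-column case: A finds no pair, B's sums list has at most one entry
lemma small_case (arr2D : List (List Int)) (hne : arr2D ≠ [])
    (hsmall : (arr2D.headD []).length ≤ 1) :
    ((PySem.List.pyRange 0 (((arr2D.headD []).length : Nat) : Int) 1).any (fun c1 =>
      (PySem.List.pyRange (c1 + 1) (((arr2D.headD []).length : Nat) : Int) 1).any (fun c2 =>
        colSumA arr2D c1 == colSumA arr2D c2)))
    = decide (¬(PySem.Set.ofList (((List.range (((arr2D.map List.length).min?).getD 0)).map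
        (fun c => arr2D.map (fun row => row.getD c 0))).map List.sum)).length
      = (((List.range (((arr2D.map List.length).min?).getD 0)).map
        (fun c => arr2D.map (fun row => row.getD c 0))).map List.sum).length) := by
  have hmle : ((arr2D.map List.length).min?).getD 0 ≤ 1 :=
    le_trans (min_le_head arr2D hne) hsmall
  have hBnd : (((List.range (((arr2D.map List.length).min?).getD 0)).map
      (fun c => arr2D.map (fun row => row.getD c 0))).map List.sum).Nodup :=
    nodup_of_le_one (by simp; omega)
  have hBlen := (set_len_iff _).mpr hBnd
  rw [hBlen]
  simp only [not_true, decide_false]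
  have h01 : (arr2D.headD []).length = 0 ∨ (arr2D.headD []).length = 1 := by omega
  rcases h01 with h0' | h1'
  · rw [h0']
    simp [PySem.List.pyRange_one_eq_nil]
  · rw [h1']
    rw [show ((((1 : Nat) : Nat)) : Int) = 0 + 1 by norm_num, PySem.List.pyRange_one_singleton]
    simp [PySem.List.pyRange_one_eq_nil]

-- ===== VERDICT (by name: the statement is the Claim_ definition above) =====
set_option maxRecDepth 4096 in
theorem f_spec : Claim_equal_f := by
  intro arr2D hdom hpre
  unfold Spec_f f f_alt zipStar
  obtain ⟨hne, hpre2⟩ := hpre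
  have h0 : PySem.List.pyGetD arr2D 0 [] = arr2D.headD [] := by
    obtain ⟨a, tl, rfl⟩ := List.exists_cons_of_ne_nil hne
    simp [PySem.List.pyGetD]
  rw [h0]
  rcases hpre2 with hsmall | hle
  · exact small_case arr2D hne hsmall
  rw [min_len arr2D hne hle]
  set n : Nat := (arr2D.headD []).length with hn
  set g : Nat → Int := fun c => colSumA arr2D (c : Int) with hg
  have hsums : ((List.range n).map (fun c => arr2D.map (fun row => row.getD c 0))).map List.sum
      = (List.range n).map g := by
    rw [List.map_map]
    exact List.map_congr_left (fun c _ => colSum_eq arr2D c)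
  rw [hsums]
  have hB : (decide ¬(PySem.Set.ofList ((List.range n).map g)).length
      = ((List.range n).map g).length) = true
      ↔ ∃ i j : Nat, i < j ∧ j < n ∧ g i = g j := by
    rw [decide_eq_true_iff, set_len_iff, nodup_map_range_iff]
    push Not
    constructor
    · rintro ⟨i, j, hij, hj, hgij⟩; exact ⟨i, j, hij, hj, hgij⟩
    · rintro ⟨i, j, hij, hj, hgij⟩; exact ⟨i, j, hij, hj, hgij⟩
  have hA : ((PySem.List.pyRange 0 (n : Int) 1).any (fun c1 =>
      (PySem.List.pyRange (c1 + 1) (n : Int) 1).any (fun c2 =>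
        colSumA arr2D c1 == colSumA arr2D c2))) = true
      ↔ ∃ i j : Nat, i < j ∧ j < n ∧ g i = g j := by
    simp only [List.any_eq_true, PySem.List.mem_pyRange_one, beq_iff_eq]
    constructor
    · rintro ⟨c1, ⟨h1, h1n⟩, c2, ⟨h12, h2n⟩, heq⟩
      refine ⟨c1.toNat, c2.toNat, by omega, by omega, ?_⟩
      simp only [hg]
      rw [Int.toNat_of_nonneg h1, Int.toNat_of_nonneg (by omega)]
      exact heq
    · rintro ⟨i, j, hij, hj, hgij⟩
      exact ⟨(i : Int), ⟨by omega, by omega⟩, (j : Int), ⟨by omega, by omega⟩, hgij⟩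
  exact Bool.eq_iff_iff.mpr (hA.trans hB.symm)
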